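-- pv_equiv track=rewrite | github.com/ASB1127/A2 | A2.py | format_transformed_feature_name
-- ===== SOURCE A (Python) =====
-- def format_transformed_feature_name(feature_name: str, categorical_cols: list[str]) -> str:
--     """Convert transformed column names into cleaner plot labels."""
--     clean_name = feature_name
--     for prefix in ("num__", "cat__", "remainder__", "imputer__", "scaler__", "onehot__"):
--         if clean_name.startswith(prefix):
--             clean_name = clean_name[len(prefix):]
--
--     for col in sorted(categorical_cols, key=len, reverse=True):
--         column_prefix = f"{col}_"
--         if clean_name.startswith(column_prefix):
--             return f"{col} = {clean_name[len(column_prefix):]}"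
--
--     return clean_name
-- ===== SOURCE B (Python) =====
-- def format_transformed_feature_name(feature_name: str, categorical_cols: list[str]) -> str:
--     """Convert transformed column names into cleaner plot labels."""
--     clean_name = feature_name
--     for prefix in ("num__", "cat__", "remainder__", "imputer__", "scaler__", "onehot__"):
--         if clean_name.startswith(prefix):
--             clean_name = clean_name[len(prefix):]
--
--     # single running-maximum scan in original order instead of sort-then-first-match;
--     # strict '>' keeps the first longest match, matching the stable sort's tie-break
--     best = None
--     for col in categorical_cols:
--         if clean_name.startswith(col + "_") and (best is None or len(col) > len(best)):
--             best = col
--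
--     if best is not None:
--         return f"{best} = {clean_name[len(best) + 1:]}"
--     return clean_name
-- ===== Notes on version B (the rewrite author's own statement) =====
-- stated objective: simpler
-- what changed: Replaces sorting categorical_cols by length and returning the first matching prefix with a single unsorted pass keeping a running longest match (strict '>' preserves the stable sort's first-of-equal-length tie-break).
import Mathlib
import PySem

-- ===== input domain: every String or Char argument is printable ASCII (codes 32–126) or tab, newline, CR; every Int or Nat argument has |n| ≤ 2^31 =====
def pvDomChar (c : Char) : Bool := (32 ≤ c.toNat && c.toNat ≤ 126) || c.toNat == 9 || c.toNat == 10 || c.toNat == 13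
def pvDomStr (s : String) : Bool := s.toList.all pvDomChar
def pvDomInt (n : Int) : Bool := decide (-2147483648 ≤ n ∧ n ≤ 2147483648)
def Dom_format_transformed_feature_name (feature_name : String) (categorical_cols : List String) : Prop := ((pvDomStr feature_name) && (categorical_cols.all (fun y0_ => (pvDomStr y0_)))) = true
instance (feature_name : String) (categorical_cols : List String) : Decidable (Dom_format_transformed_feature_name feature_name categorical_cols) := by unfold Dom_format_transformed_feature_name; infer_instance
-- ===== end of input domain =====

-- B replaces A's sort-by-length-then-first-match with a single running-longest-match scan (simpler; no sort).

-- ===== PORT A =====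
-- shared by both ports: both Pythons contain the identical sequential prefix-stripping loop
def pvStripPrefixes (s : List Char) : List Char :=
  ["num__".toList, "cat__".toList, "remainder__".toList, "imputer__".toList,
   "scaler__".toList, "onehot__".toList].foldl
    (fun c p => if PySem.Chars.startswith c p then PySem.List.slice c (some (p.length : Int)) none else c) s

-- A's second loop: first match over the length-sorted (descending, stable) list
def pvScanA (clean : List Char) : List String → String
  | [] => String.mk clean
  | col :: rest =>
    let cp := col.toList ++ ['_']
    if PySem.Chars.startswith clean cp then
      String.mk (col.toList ++ " = ".toList ++ PySem.List.slice clean (some (cp.length : Int)) none)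
    else pvScanA clean rest

def format_transformed_feature_name (feature_name : String) (categorical_cols : List String) : String :=
  pvScanA (pvStripPrefixes feature_name.toList)
    (PySem.List.sorted categorical_cols (fun c => PySem.Str.len c) true)

-- ===== PORT B =====
def format_transformed_feature_name_alt (feature_name : String) (categorical_cols : List String) : String :=
  let clean := pvStripPrefixes feature_name.toList
  let best := categorical_cols.foldl
    (fun best col =>
      if PySem.Chars.startswith clean (col.toList ++ ['_']) &&
         (match best with
          | none => true
          | some b => decide (PySem.Str.len b < PySem.Str.len col))
      then some col else best)
    (none : Option String)
  match best with
  | some b => String.mk (b.toList ++ " = ".toList ++ PySem.List.slice clean (some ((b.toList.length : Int) + 1)) none)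
  | none => String.mk clean

-- ===== PRECONDITION & SPEC =====
def Spec_format_transformed_feature_name (feature_name : String) (categorical_cols : List String) (out : String) : Prop := out = format_transformed_feature_name_alt feature_name categorical_cols
instance (feature_name : String) (categorical_cols : List String) (out : String) : Decidable (Spec_format_transformed_feature_name feature_name categorical_cols out) := by unfold Spec_format_transformed_feature_name; infer_instance

-- ===== CLAIM (what is proved, stated in full; the proofs are below) =====
def Claim_equal_format_transformed_feature_name : Prop := ∀ (feature_name : String) (categorical_cols : List String), Dom_format_transformed_feature_name feature_name categorical_cols → Spec_format_transformed_feature_name feature_name categorical_cols (format_transformed_feature_name feature_name categorical_cols)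

-- ===== LEMMAS AND PROOFS =====

-- the running-maximum update performed by B's fold
def pvUpd (clean : List Char) (best : Option String) (col : String) : Option String :=
  if PySem.Chars.startswith clean (col.toList ++ ['_']) &&
     (match best with
      | none => true
      | some b => decide (PySem.Str.len b < PySem.Str.len col))
  then some col else best

-- the first match of A's scan, separated from the formatting
def pvFirst (clean : List Char) : List String → Option String
  | [] => none
  | col :: rest =>
    if PySem.Chars.startswith clean (col.toList ++ ['_']) then some col else pvFirst clean rest

def pvRender (clean : List Char) : Option String → String
  | some b => String.mk (b.toList ++ " = ".toList ++ PySem.List.slice clean (some ((b.toList.length : Int) + 1)) none)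
  | none => String.mk clean

lemma pvScanA_eq_render (clean : List Char) (ys : List String) :
    pvScanA clean ys = pvRender clean (pvFirst clean ys) := by
  induction ys with
  | nil => rfl
  | cons col rest ih =>
    simp only [pvScanA, pvFirst]
    by_cases h : PySem.Chars.startswith clean (col.toList ++ ['_']) = true
    · simp [h, pvRender]
    · simp [h, ih]

lemma pvFirst_mem (clean : List Char) (ys : List String) (m : String)
    (h : pvFirst clean ys = some m) : m ∈ ys := by
  induction ys with
  | nil => simp [pvFirst] at h
  | cons col rest ih =>
    simp only [pvFirst] at h
    split at h
    · cases h; simp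
    · exact List.mem_cons_of_mem _ (ih h)

lemma pvStep (clean : List Char) (x : String) (acc : List String)
    (hs : acc.Pairwise (fun a b => String.length b ≤ String.length a)) :
    pvFirst clean (PySem.List.insertBy (fun a b => decide (PySem.Str.len b < PySem.Str.len a)) x acc)
      = pvUpd clean (pvFirst clean acc) x := by
  induction acc with
  | nil =>
    simp [PySem.List.insertBy, pvFirst, pvUpd]
  | cons y t ih =>
    have hyt : ∀ z ∈ t, String.length z ≤ String.length y := by
      intro z hz; exact (List.pairwise_cons.mp hs).1 z hz
    have hst : t.Pairwise (fun a b => String.length b ≤ String.length a) :=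
      (List.pairwise_cons.mp hs).2
    by_cases hb : String.length y < String.length x
    · -- x inserted in front
      have hins : PySem.List.insertBy (fun a b => decide (PySem.Str.len b < PySem.Str.len a)) x (y :: t)
          = x :: y :: t := by
        simp [PySem.List.insertBy, hb]
      have l1 : pvFirst clean (x :: y :: t)
          = if PySem.Chars.startswith clean (x.toList ++ ['_']) then some x
            else pvFirst clean (y :: t) := rfl
      rw [hins, l1]
      by_cases hpx : PySem.Chars.startswith clean (x.toList ++ ['_']) = true
      · rw [if_pos hpx]
        rcases hfe : pvFirst clean (y :: t) with _ | m
        · simp [pvUpd, hpx]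
        · have hm : m ∈ y :: t := pvFirst_mem _ _ _ hfe
          have hlm : String.length m ≤ String.length y := by
            rcases List.mem_cons.mp hm with rfl | hmt
            · exact le_refl _
            · exact hyt m hmt
          simp [pvUpd, hpx, lt_of_le_of_lt hlm hb]
      · rw [if_neg hpx]
        simp [pvUpd, hpx]
    · -- x inserted after y
      have hins : PySem.List.insertBy (fun a b => decide (PySem.Str.len b < PySem.Str.len a)) x (y :: t)
          = y :: PySem.List.insertBy (fun a b => decide (PySem.Str.len b < PySem.Str.len a)) x t := by
        simp [PySem.List.insertBy, hb]
      have l1 : pvFirst clean (y :: PySem.List.insertBy (fun a b => decide (PySem.Str.len b < PySem.Str.len a)) x t)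
          = if PySem.Chars.startswith clean (y.toList ++ ['_']) then some y
            else pvFirst clean (PySem.List.insertBy (fun a b => decide (PySem.Str.len b < PySem.Str.len a)) x t) := rfl
      have l2 : pvFirst clean (y :: t)
          = if PySem.Chars.startswith clean (y.toList ++ ['_']) then some y
            else pvFirst clean t := rfl
      rw [hins, l1, l2]
      by_cases hpy : PySem.Chars.startswith clean (y.toList ++ ['_']) = true
      · rw [if_pos hpy, if_pos hpy]
        simp [pvUpd, hb]
      · rw [if_neg hpy, if_neg hpy]
        exact ih hst

lemma pvInsertBy_pairwise (x : String) (acc : List String)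
    (hs : acc.Pairwise (fun a b => String.length b ≤ String.length a)) :
    (PySem.List.insertBy (fun a b => decide (PySem.Str.len b < PySem.Str.len a)) x acc).Pairwise
      (fun a b => String.length b ≤ String.length a) := by
  induction acc with
  | nil => simp [PySem.List.insertBy]
  | cons y t ih =>
    have hyt : ∀ z ∈ t, String.length z ≤ String.length y := by
      intro z hz; exact (List.pairwise_cons.mp hs).1 z hz
    have hst : t.Pairwise (fun a b => String.length b ≤ String.length a) :=
      (List.pairwise_cons.mp hs).2
    by_cases hb : String.length y < String.length x
    · have heq : PySem.List.insertBy (fun a b => decide (PySem.Str.len b < PySem.Str.len a)) x (y :: t)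
          = x :: y :: t := by simp [PySem.List.insertBy, hb]
      rw [heq]
      refine List.pairwise_cons.mpr ⟨?_, hs⟩
      intro z hz
      rcases List.mem_cons.mp hz with rfl | hzt
      · exact le_of_lt hb
      · exact le_trans (hyt z hzt) (le_of_lt hb)
    · have heq : PySem.List.insertBy (fun a b => decide (PySem.Str.len b < PySem.Str.len a)) x (y :: t)
          = y :: PySem.List.insertBy (fun a b => decide (PySem.Str.len b < PySem.Str.len a)) x t := by
        simp [PySem.List.insertBy, hb]
      rw [heq]
      refine List.pairwise_cons.mpr ⟨?_, ih hst⟩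
      intro z hz
      rcases (PySem.List.mem_insertBy _ _ _ _).mp hz with rfl | hzt
      · exact not_lt.mp hb
      · exact hyt z hzt

lemma pvFold_eq (clean : List Char) (cols : List String) :
    ∀ (acc : List String), acc.Pairwise (fun a b => String.length b ≤ String.length a) →
    pvFirst clean (cols.foldl
        (fun a x => PySem.List.insertBy (fun a b => decide (PySem.Str.len b < PySem.Str.len a)) x a) acc)
      = cols.foldl (pvUpd clean) (pvFirst clean acc) := by
  induction cols with
  | nil => intro acc _; rfl
  | cons c cs ih =>
    intro acc hs
    simp only [List.foldl_cons]
    rw [ih _ (pvInsertBy_pairwise c acc hs), pvStep clean c acc hs]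

lemma pvFirst_sorted_eq (clean : List Char) (cols : List String) :
    pvFirst clean (PySem.List.sorted cols (fun c => PySem.Str.len c) true)
      = cols.foldl (pvUpd clean) none := by
  rw [PySem.List.sorted_rev_eq_foldl_insertBy]
  simpa using pvFold_eq clean cols [] (by simp)

-- ===== VERDICT (by name: the statement is the Claim_ definition above) =====
theorem format_transformed_feature_name_spec : Claim_equal_format_transformed_feature_name := by
  intro feature_name categorical_cols _
  unfold Spec_format_transformed_feature_name
  unfold format_transformed_feature_name format_transformed_feature_name_alt
  rw [pvScanA_eq_render, pvFirst_sorted_eq]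
  rfl
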